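-- pv_equiv track=rewrite | github.com/chrisminnick/modern-frontend-web-dev | instructor/slide-generation/scripts/generate_slides_pdf_pandoc.py | process_markdown_for_pandoc
-- ===== SOURCE A (Python) =====
-- def process_markdown_for_pandoc(markdown_content):
--     """
--     Process markdown content to add page breaks and improve formatting
--     """
--     lines = markdown_content.split('\n')
--     processed_lines = []
--
--     for i, line in enumerate(lines):
--         # Check if this is a slide title (## followed by content, but not module headers)
--         if (line.startswith('## ') and
--             not line.startswith('## Module ') and
--             not line.startswith('## Comprehensive Course Slides')):
--
--             # Add page break before slide title (except for the first slide)
--             if i > 0 and processed_lines: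
--                 processed_lines.append('')
--                 processed_lines.append('\\newpage')
--                 processed_lines.append('')
--
--         processed_lines.append(line)
--
--     return '\n'.join(processed_lines)
-- ===== SOURCE B (Python) =====
-- def process_markdown_for_pandoc(markdown_content):
--     """Block-based rewrite: split into slide blocks, join with a \newpage separator."""
--     def is_slide_title(line):
--         return (line.startswith('## ')
--                 and not line.startswith('## Module ')
--                 and not line.startswith('## Comprehensive Course Slides'))
--
--     lines = markdown_content.split('\n')
--     blocks = [[lines[0]]]
--     for line in lines[1:]:
--         if is_slide_title(line):
--             blocks.append([line])
--         else:
--             blocks[-1].append(line)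
--     return '\n\n\\newpage\n\n'.join('\n'.join(block) for block in blocks)
-- ===== Notes on version B (the rewrite author's own statement) =====
-- stated objective: simpler
-- what changed: Replaces A's enumerate-and-insert-marker-lines loop by a block decomposition: lines are partitioned into blocks starting at each slide title (after the first line) and the block texts are joined with one fixed page-break separator string.
import Mathlib
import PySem

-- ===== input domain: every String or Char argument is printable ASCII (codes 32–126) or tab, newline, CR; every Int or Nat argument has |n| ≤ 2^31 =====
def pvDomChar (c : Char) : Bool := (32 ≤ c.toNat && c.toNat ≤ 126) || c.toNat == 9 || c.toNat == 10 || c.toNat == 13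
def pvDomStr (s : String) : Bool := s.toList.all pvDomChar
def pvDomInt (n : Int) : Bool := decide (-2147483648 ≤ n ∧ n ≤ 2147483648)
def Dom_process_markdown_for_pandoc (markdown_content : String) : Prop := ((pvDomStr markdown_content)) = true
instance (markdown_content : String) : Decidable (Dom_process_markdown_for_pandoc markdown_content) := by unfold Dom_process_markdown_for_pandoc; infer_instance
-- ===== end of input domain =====

-- B rewrites A's insert-marker-lines loop as a block decomposition: split at slide titles,
-- join blocks with a fixed '\n\n\newpage\n\n' separator (objective: simpler).

-- ===== PORT A =====
-- A's loop body (the title test is A's inline conjunction; the marker insertion is guarded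
-- by 'i > 0 and processed_lines' exactly as in the Python).
def pvStepA (acc : List (List Char)) (p : Int × List Char) : List (List Char) :=
  let acc1 :=
    if PySem.Chars.startswith p.2 "## ".toList
        && !PySem.Chars.startswith p.2 "## Module ".toList
        && !PySem.Chars.startswith p.2 "## Comprehensive Course Slides".toList then
      (if decide (0 < p.1) && !acc.isEmpty then acc ++ [[], "\\newpage".toList, []] else acc)
    else acc
  acc1 ++ [p.2]

def process_markdown_for_pandoc (markdown_content : String) : String :=
  let lines := PySem.Chars.splitOn markdown_content.toList "\n".toList
  let processed := (PySem.List.enumerate lines 0).foldl pvStepA []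
  String.ofList (PySem.Chars.join "\n".toList processed)

-- ===== PORT B =====
def pvIsSlideTitle (line : List Char) : Bool :=
  PySem.Chars.startswith line "## ".toList
    && !PySem.Chars.startswith line "## Module ".toList
    && !PySem.Chars.startswith line "## Comprehensive Course Slides".toList

-- B's loop body: start a new block at a slide title, else append to the last block.
def pvStepB (bs : List (List (List Char))) (line : List Char) : List (List (List Char)) :=
  if pvIsSlideTitle line then bs ++ [[line]]
  else bs.dropLast ++ [bs.getLastD [] ++ [line]]

def process_markdown_for_pandoc_alt (markdown_content : String) : String :=
  let lines := PySem.Chars.splitOn markdown_content.toList "\n".toList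
  match lines with
  | [] => ""  -- unreachable: split never returns an empty list (Python's lines[0] always exists)
  | l :: ls =>
    let blocks := ls.foldl pvStepB [[l]]
    String.ofList (PySem.Chars.join "\n\n\\newpage\n\n".toList
      (blocks.map (PySem.Chars.join "\n".toList)))

-- ===== PRECONDITION & SPEC =====
def Spec_process_markdown_for_pandoc (markdown_content : String) (out : String) : Prop := out = process_markdown_for_pandoc_alt markdown_content
instance (markdown_content : String) (out : String) : Decidable (Spec_process_markdown_for_pandoc markdown_content out) := by unfold Spec_process_markdown_for_pandoc; infer_instance

-- ===== CLAIM (what is proved, stated in full; the proofs are below) =====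
def Claim_equal_process_markdown_for_pandoc : Prop := ∀ (markdown_content : String), Dom_process_markdown_for_pandoc markdown_content → Spec_process_markdown_for_pandoc markdown_content (process_markdown_for_pandoc markdown_content)

-- ===== LEMMAS AND PROOFS =====

-- what A appends for one line of the tail
def pvF (line : List Char) : List (List Char) :=
  if pvIsSlideTitle line then [[], "\\newpage".toList, [], line] else [line]

-- B's blocks, recursively: b is the (nonempty) current block
def pvBlks (b : List (List Char)) : List (List Char) → List (List (List Char))
  | [] => [b]
  | x :: xs => if pvIsSlideTitle x then b :: pvBlks [x] xs else pvBlks (b ++ [x]) xs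

theorem pvBlks_ne_nil (b : List (List Char)) (ls : List (List Char)) : pvBlks b ls ≠ [] := by
  induction ls generalizing b with
  | nil => simp [pvBlks]
  | cons x xs ih => by_cases h : pvIsSlideTitle x <;> simp [pvBlks, h, ih]

theorem pvJoinAppend (sep : List Char) (p q : List (List Char)) (hp : p ≠ []) (hq : q ≠ []) :
    PySem.Chars.join sep (p ++ q) = PySem.Chars.join sep p ++ sep ++ PySem.Chars.join sep q := by
  induction p with
  | nil => exact absurd rfl hp
  | cons a p' ih =>
    cases p' with
    | nil =>
      obtain ⟨c, q', rfl⟩ := List.exists_cons_of_ne_nil hq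
      simp [PySem.Chars.join_singleton, PySem.Chars.join_cons_cons]
    | cons a2 p'' =>
      have e1 : (a :: a2 :: p'') ++ q = a :: (a2 :: p'') ++ q := by simp
      rw [e1, show a :: (a2 :: p'') ++ q = a :: ((a2 :: p'') ++ q) from rfl,
        show (a2 :: p'') ++ q = a2 :: (p'' ++ q) from rfl]
      rw [PySem.Chars.join_cons_cons,
        show a2 :: (p'' ++ q) = (a2 :: p'') ++ q from rfl, ih (by simp),
        PySem.Chars.join_cons_cons]
      simp [List.append_assoc]

theorem pvFoldA (ls : List (List Char)) : ∀ (i : Int) (acc : List (List Char)),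
    1 ≤ i → acc ≠ [] →
    (PySem.List.enumerate ls i).foldl pvStepA acc = acc ++ ls.flatMap pvF := by
  induction ls with
  | nil => intro i acc _ _; simp [PySem.List.enumerate_nil]
  | cons x xs ih =>
    intro i acc hi hacc
    rw [PySem.List.enumerate_cons]
    have h0 : (0:Int) < i := by omega
    have hstep : pvStepA acc (i, x) = acc ++ pvF x := by
      simp only [pvStepA, pvF, pvIsSlideTitle]
      simp [h0, hacc]
      split <;> simp
    rw [List.foldl_cons, hstep, ih (i + 1) (acc ++ pvF x) (by omega) (by simp [pvF]; split <;> simp)]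
    simp [List.append_assoc]

theorem pvFoldB (ls : List (List Char)) : ∀ (bs : List (List (List Char))) (b : List (List Char)),
    List.foldl pvStepB (bs ++ [b]) ls = bs ++ pvBlks b ls := by
  induction ls with
  | nil => intro bs b; simp [pvBlks]
  | cons x xs ih =>
    intro bs b
    by_cases ht : pvIsSlideTitle x
    · have hstep : pvStepB (bs ++ [b]) x = (bs ++ [b]) ++ [[x]] := by simp [pvStepB, ht]
      rw [List.foldl_cons, hstep, ih (bs ++ [b]) [x]]
      simp [pvBlks, ht, List.append_assoc]
    · have hstep : pvStepB (bs ++ [b]) x = bs ++ [b ++ [x]] := by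
        simp [pvStepB, ht]
      rw [List.foldl_cons, hstep, ih bs (b ++ [x])]
      simp [pvBlks, ht]

theorem pvCore (ls : List (List Char)) : ∀ (b : List (List Char)), b ≠ [] →
    PySem.Chars.join "\n".toList (b ++ ls.flatMap pvF)
      = PySem.Chars.join "\n\n\\newpage\n\n".toList
          ((pvBlks b ls).map (PySem.Chars.join "\n".toList)) := by
  induction ls with
  | nil => intro b _; simp [pvBlks, PySem.Chars.join_singleton]
  | cons x xs ih =>
    intro b hb
    by_cases ht : pvIsSlideTitle x
    · have h1 : b ++ (x :: xs).flatMap pvF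
          = b ++ ([] :: "\\newpage".toList :: [] :: x :: xs.flatMap pvF) := by
        simp [pvF, ht]
      rw [h1, pvJoinAppend _ b _ hb (by simp), PySem.Chars.join_cons_cons,
        PySem.Chars.join_cons_cons, PySem.Chars.join_cons_cons]
      have h2 : (pvBlks b (x :: xs)).map (PySem.Chars.join "\n".toList)
          = [PySem.Chars.join "\n".toList b]
              ++ (pvBlks [x] xs).map (PySem.Chars.join "\n".toList) := by
        simp [pvBlks, ht]
      rw [h2, pvJoinAppend _ _ _ (by simp) (by simp [pvBlks_ne_nil]),
        PySem.Chars.join_singleton, ← ih [x] (by simp)]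
      simp [List.append_assoc]
    · have h1 : b ++ (x :: xs).flatMap pvF = (b ++ [x]) ++ xs.flatMap pvF := by
        simp [pvF, ht, List.append_assoc]
      rw [h1, ih (b ++ [x]) (by simp), ]
      simp [pvBlks, ht]

-- ===== VERDICT (by name: the statement is the Claim_ definition above) =====
theorem process_markdown_for_pandoc_spec : Claim_equal_process_markdown_for_pandoc := by
  intro s _
  unfold Spec_process_markdown_for_pandoc process_markdown_for_pandoc process_markdown_for_pandoc_alt
  cases h : PySem.Chars.splitOn s.toList "\n".toList with
  | nil => simp [PySem.List.enumerate_nil, PySem.Chars.join_nil]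
  | cons l ls =>
    simp only [PySem.List.enumerate_cons, List.foldl_cons]
    have hfirst : pvStepA [] ((0 : Int), l) = [l] := by
      simp [pvStepA]
    rw [hfirst, pvFoldA ls (0 + 1) [l] (by norm_num) (by simp)]
    have hB : List.foldl pvStepB [[l]] ls = pvBlks [l] ls := pvFoldB ls [] [l]
    rw [hB, pvCore ls [l] (by simp)]
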